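-- pv_equiv track=rewrite | github.com/cometadata/funding-metadata-enrichment | extract_structured_funding/src/funding_extractor/providers.py | validate_openai_model
-- ===== SOURCE A (Python) =====
-- def validate_openai_model(model_id: str) -> bool:
--     """Validate that an OpenAI model ID is in the expected format.
--
--     Args:
--         model_id: The model ID to validate
--
--     Returns:
--         True if the model ID appears valid
--     """
--     valid_patterns = [
--         "gpt-4o",
--         "gpt-4o-mini",
--         "gpt-4-turbo",
--         "gpt-4",
--         "gpt-3.5-turbo",
--         "o1-preview",
--         "o1-mini",
--         "o3-mini",
--     ]
--
--     for pattern in valid_patterns: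
--         if model_id == pattern or model_id.startswith(f"{pattern}-"):
--             return True
--
--     return False
-- ===== SOURCE B (Python) =====
-- def validate_openai_model(model_id: str) -> bool:
--     valid = {
--         "gpt-4o",
--         "gpt-4o-mini",
--         "gpt-4-turbo",
--         "gpt-4",
--         "gpt-3.5-turbo",
--         "o1-preview",
--         "o1-mini",
--         "o3-mini",
--     }
--     n = len(model_id)
--     for i in range(n + 1):
--         if (i == n or model_id[i] == '-') and model_id[:i] in valid:
--             return True
--     return False
-- ===== Notes on version B (the rewrite author's own statement) =====
-- stated objective: alternative
-- what changed: Instead of looping over the 8 patterns testing equality/startswith, B scans the input's dash-boundary positions once and tests each dash-bounded prefix for membership in a set of the valid patterns.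
import Mathlib
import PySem

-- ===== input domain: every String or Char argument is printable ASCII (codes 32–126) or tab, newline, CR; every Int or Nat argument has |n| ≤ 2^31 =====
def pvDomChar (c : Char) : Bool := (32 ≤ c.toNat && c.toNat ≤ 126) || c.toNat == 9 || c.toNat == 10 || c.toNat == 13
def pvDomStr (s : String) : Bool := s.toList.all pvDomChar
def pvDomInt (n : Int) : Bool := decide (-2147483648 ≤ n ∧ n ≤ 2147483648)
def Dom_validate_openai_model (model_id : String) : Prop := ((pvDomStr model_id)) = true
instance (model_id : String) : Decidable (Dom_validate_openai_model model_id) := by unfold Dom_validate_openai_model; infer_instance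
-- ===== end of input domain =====

-- B replaces A's loop over the patterns (equality / startswith per pattern) by a single scan of the
-- input's dash-boundary positions, testing each dash-bounded prefix for membership in a set of the
-- valid patterns; same cost class, different decomposition.

-- ===== PORT A =====
-- A's pattern list, in A's order
def pvPatterns : List (List Char) :=
  [ "gpt-4o".toList, "gpt-4o-mini".toList, "gpt-4-turbo".toList, "gpt-4".toList,
    "gpt-3.5-turbo".toList, "o1-preview".toList, "o1-mini".toList, "o3-mini".toList ]

-- A's 'for pattern in valid_patterns: if model_id == pattern or model_id.startswith(pattern + "-"): return True'
def pvALoop (s : List Char) : List (List Char) → Bool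
  | [] => false
  | p :: rest =>
      if s == p || PySem.Chars.startswith s (p ++ ['-']) then true else pvALoop s rest

def validate_openai_model (model_id : String) : Bool :=
  pvALoop model_id.toList pvPatterns

-- ===== PORT B =====
-- B's set literal of the valid patterns
def pvValidSet : PySem.Set (List Char) :=
  PySem.Set.ofList
    [ "gpt-4o".toList, "gpt-4o-mini".toList, "gpt-4-turbo".toList, "gpt-4".toList,
      "gpt-3.5-turbo".toList, "o1-preview".toList, "o1-mini".toList, "o3-mini".toList ]

-- B's 'for i in range(n + 1): if (i == n or model_id[i] == '-') and model_id[:i] in valid: return True'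
def pvBLoop (s : List Char) (i : Nat) : Bool :=
  if h : i ≤ s.length then
    if (i == s.length || s[i]? == some '-') && PySem.Set.contains pvValidSet (s.take i) then
      true
    else
      pvBLoop s (i + 1)
  else
    false
termination_by s.length + 1 - i
decreasing_by omega

def validate_openai_model_alt (model_id : String) : Bool :=
  pvBLoop model_id.toList 0

-- ===== PRECONDITION & SPEC =====
def Spec_validate_openai_model (model_id : String) (out : Bool) : Prop := out = validate_openai_model_alt model_id
instance (model_id : String) (out : Bool) : Decidable (Spec_validate_openai_model model_id out) := by unfold Spec_validate_openai_model; infer_instance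

-- ===== CLAIM (what is proved, stated in full; the proofs are below) =====
def Claim_equal_validate_openai_model : Prop := ∀ (model_id : String), Dom_validate_openai_model model_id → Spec_validate_openai_model model_id (validate_openai_model model_id)

-- ===== LEMMAS AND PROOFS =====

-- A's loop returns true iff some pattern matches by equality or dash-extended prefix
theorem pvALoop_iff (s : List Char) (ps : List (List Char)) :
    pvALoop s ps = true ↔ ∃ p ∈ ps, s = p ∨ (p ++ ['-']) <+: s := by
  induction ps with
  | nil => simp [pvALoop]
  | cons p rest ih =>
      simp only [pvALoop]
      split
      next hcond =>
        simp only [true_iff]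
        rcases Bool.or_eq_true_iff.mp hcond with h' | h'
        · exact ⟨p, List.mem_cons_self, Or.inl (by simpa using h')⟩
        · exact ⟨p, List.mem_cons_self, Or.inr ((PySem.Chars.startswith_iff _ _).mp h')⟩
      next hcond =>
        rw [ih]
        constructor
        · rintro ⟨q, hq, hm⟩; exact ⟨q, List.mem_cons_of_mem _ hq, hm⟩
        · rintro ⟨q, hq, hm⟩
          rcases List.mem_cons.mp hq with rfl | hq'
          · exfalso; apply hcond
            rcases hm with rfl | hm
            · simp
            · simp [(PySem.Chars.startswith_iff _ _).mpr hm]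
          · exact ⟨q, hq', hm⟩

-- B's loop returns true iff some dash-boundary position at or after i has its prefix in the set
theorem pvBLoop_iff (s : List Char) (i : Nat) :
    pvBLoop s i = true ↔
      ∃ j, i ≤ j ∧ j ≤ s.length ∧ (j = s.length ∨ s[j]? = some '-') ∧
        (s.take j) ∈ pvValidSet := by
  rw [pvBLoop]
  split
  next h =>
    split
    next hc =>
      simp only [true_iff]
      rcases Bool.and_eq_true_iff.mp hc with ⟨h1, h2⟩
      refine ⟨i, le_refl i, h, ?_, (PySem.Set.contains_iff _ _).mp h2⟩
      rcases Bool.or_eq_true_iff.mp h1 with h' | h'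
      · exact Or.inl (by simpa using h')
      · exact Or.inr (by simpa using h')
    next hc =>
      rw [pvBLoop_iff s (i + 1)]
      constructor
      · rintro ⟨j, hj1, hj2, hj3, hj4⟩; exact ⟨j, by omega, hj2, hj3, hj4⟩
      · rintro ⟨j, hj1, hj2, hj3, hj4⟩
        rcases Nat.lt_or_ge i j with hij | hij
        · exact ⟨j, hij, hj2, hj3, hj4⟩
        · exfalso
          have hji : j = i := by omega
          subst hji
          apply hc
          refine Bool.and_eq_true_iff.mpr ⟨?_, (PySem.Set.contains_iff _ _).mpr hj4⟩
          rcases hj3 with hj3 | hj3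
          · simp [hj3]
          · simp [hj3]
  next h =>
    simp only [Bool.false_eq_true, false_iff]
    rintro ⟨j, hj1, hj2, _, _⟩; omega
termination_by s.length + 1 - i
decreasing_by omega

-- membership in B's set is membership in A's pattern list
theorem pvMem_validSet (t : List Char) : t ∈ pvValidSet ↔ t ∈ pvPatterns := by
  rw [show pvValidSet = PySem.Set.ofList pvPatterns from rfl, PySem.Set.mem_ofList]

-- ===== VERDICT (by name: the statement is the Claim_ definition above) =====
theorem validate_openai_model_spec : Claim_equal_validate_openai_model := by
  intro model_id _
  unfold Spec_validate_openai_model validate_openai_model validate_openai_model_alt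
  rw [Bool.eq_iff_iff, pvALoop_iff, pvBLoop_iff]
  generalize model_id.toList = s
  constructor
  · rintro ⟨p, hp, hsp | ⟨t, ht⟩⟩
    · refine ⟨s.length, Nat.zero_le _, le_refl _, Or.inl rfl, ?_⟩
      rw [List.take_length, hsp]; exact (pvMem_validSet p).mpr hp
    · -- ht : p ++ ['-'] ++ t = s
      subst ht
      refine ⟨p.length, Nat.zero_le _, by simp, Or.inr ?_, ?_⟩
      · rw [List.append_assoc, List.getElem?_append_right (le_refl _)]
        simp
      · rw [List.append_assoc, List.take_left]
        exact (pvMem_validSet p).mpr hp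
  · rintro ⟨j, _, hj2, hj3, hj4⟩
    refine ⟨s.take j, (pvMem_validSet _).mp hj4, ?_⟩
    rcases hj3 with rfl | h'
    · exact Or.inl (List.take_length).symm
    · right
      have hjlt : j < s.length := by
        by_contra hge
        rw [List.getElem?_eq_none (by omega)] at h'
        cases h'
      have hget : s[j] = '-' := by
        have he := List.getElem?_eq_getElem hjlt
        rw [he] at h'
        exact Option.some.inj h'
      refine ⟨s.drop (j + 1), ?_⟩
      rw [List.append_assoc]
      conv_rhs => rw [← List.take_append_drop j s]
      congr 1
      rw [List.drop_eq_getElem_cons hjlt, hget]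
      rfl
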